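-- pv_equiv track=rewrite | github.com/wszeborj/UDEMY | Python 3 Od Podstaw Do Eksperta/lesson83ex.py | get_best_users_id
-- ===== SOURCE A (Python) =====
-- def get_best_users_id(user_completed_tasks_dict:dict) -> list:
--     '''from dict[userID]=sum_of_completed_task
--     get user Id which have the most completed tasks'''
--
--     best_users = []
--     best_users_list = [
--                       key
--                       for key, value in user_completed_tasks_dict.items()
--                       if value == max(user_completed_tasks_dict.values())
--                       ]
--
--     # for key, value in user_completed_tasks_dict.items():
--     #     if value == max(user_completed_tasks_dict.values()):
--     #         best_users.append(key)
--     return best_users_list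
-- ===== SOURCE B (Python) =====
-- def get_best_users_id(user_completed_tasks_dict: dict) -> list:
--     '''from dict[userID]=sum_of_completed_task
--     get user Id which have the most completed tasks'''
--     grouped = {}
--     for key, value in user_completed_tasks_dict.items():
--         grouped.setdefault(value, []).append(key)
--     return grouped[max(grouped)] if grouped else []
-- ===== Notes on version B (the rewrite author's own statement) =====
-- stated objective: faster
-- what changed: B groups user ids by their completed-task count in one pass over the items and returns the bucket of the largest count, instead of re-filtering the items against max(values) (which A recomputes inside the comprehension for every item).
import Mathlib
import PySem

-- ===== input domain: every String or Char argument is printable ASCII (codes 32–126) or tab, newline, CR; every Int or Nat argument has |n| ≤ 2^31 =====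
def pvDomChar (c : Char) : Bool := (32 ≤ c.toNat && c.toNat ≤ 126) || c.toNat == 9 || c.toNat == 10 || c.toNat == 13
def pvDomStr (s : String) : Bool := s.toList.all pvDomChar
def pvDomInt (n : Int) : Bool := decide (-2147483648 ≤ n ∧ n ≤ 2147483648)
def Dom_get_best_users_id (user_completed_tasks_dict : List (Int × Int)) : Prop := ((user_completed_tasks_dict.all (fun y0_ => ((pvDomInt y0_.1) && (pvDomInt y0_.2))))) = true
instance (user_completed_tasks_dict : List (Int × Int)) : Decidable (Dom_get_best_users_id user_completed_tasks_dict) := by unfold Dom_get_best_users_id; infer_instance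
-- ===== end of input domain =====

-- B indexes the items once into a count → [ids] dict and returns the bucket of the
-- largest count (or [] when the dict is empty, as A's empty comprehension does),
-- instead of A's comprehension that recomputes max(values) per item; B is
-- asymptotically faster.


-- ===== PORT A =====
-- [key for key, value in d.items() if value == max(d.values())]
def get_best_users_id (user_completed_tasks_dict : List (Int × Int)) : List Int :=
  (user_completed_tasks_dict.filter
      (fun kv => PySem.List.max? (user_completed_tasks_dict.map (fun p => p.2)) (fun v => v) == some kv.2)).map
    (fun kv => kv.1)

-- ===== PORT B =====
-- grouped.setdefault(value, []).append(key) per item; return grouped[max(grouped)]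
def get_best_users_id_alt (user_completed_tasks_dict : List (Int × Int)) : List Int :=
  let grouped := user_completed_tasks_dict.foldl
      (fun d p => d.modify p.2 [] (fun l => l ++ [p.1])) (PySem.Dict.empty)
  match PySem.List.max? grouped.keys (fun k => k) with
  | some m => grouped.getD m []
  | none => []   -- 'if grouped else []': the empty dict

-- ===== PRECONDITION & SPEC =====
def Spec_get_best_users_id (user_completed_tasks_dict : List (Int × Int)) (out : List Int) : Prop := out = get_best_users_id_alt user_completed_tasks_dict
instance (user_completed_tasks_dict : List (Int × Int)) (out : List Int) : Decidable (Spec_get_best_users_id user_completed_tasks_dict out) := by unfold Spec_get_best_users_id; infer_instance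

-- ===== CLAIM (what is proved, stated in full; the proofs are below) =====
def Claim_equal_get_best_users_id : Prop := ∀ (user_completed_tasks_dict : List (Int × Int)), Dom_get_best_users_id user_completed_tasks_dict → Spec_get_best_users_id user_completed_tasks_dict (get_best_users_id user_completed_tasks_dict)

-- ===== LEMMAS AND PROOFS =====

-- max over the distinct values equals max over all values (both are the first maximal element, and id is the key)
theorem max?_ofList_id (l : List Int) :
    PySem.List.max? (PySem.Set.ofList l) (fun x => x) = PySem.List.max? l (fun x => x) := by
  cases h1 : PySem.List.max? (PySem.Set.ofList l) (fun x : Int => x) with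
  | none =>
      rw [PySem.List.max?_eq_none_iff] at h1
      have hl : l = [] := by
        cases l with
        | nil => rfl
        | cons a t =>
            exfalso
            have : a ∈ PySem.Set.ofList (a :: t) := by
              rw [PySem.Set.mem_ofList]; exact List.mem_cons_self
            simp [h1] at this
      subst hl; rfl
  | some m1 =>
      cases h2 : PySem.List.max? l (fun x : Int => x) with
      | none =>
          rw [PySem.List.max?_eq_none_iff] at h2
          subst h2
          have h0 : PySem.List.max? (PySem.Set.ofList ([] : List Int)) (fun x : Int => x) = none := by
            rw [PySem.List.max?_eq_none_iff]; rfl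
          rw [h1] at h0
          exact absurd h0 (by simp)
      | some m2 =>
          have hm1 : m1 ∈ l := by
            have := PySem.List.max?_mem h1
            rwa [PySem.Set.mem_ofList] at this
          have hm2 : m2 ∈ PySem.Set.ofList l := by
            rw [PySem.Set.mem_ofList]; exact PySem.List.max?_mem h2
          rw [le_antisymm (PySem.List.max?_isMax h2 m1 hm1) (PySem.List.max?_isMax h1 m2 hm2)]

-- ===== VERDICT (by name: the statement is the Claim_ definition above) =====
theorem get_best_users_id_spec : Claim_equal_get_best_users_id := by
  intro xs _
  unfold Spec_get_best_users_id
  simp only [get_best_users_id_alt, get_best_users_id]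
  -- the grouping loop, rewritten over the swapped pairs so the library lemmas apply
  have hswap :
      xs.foldl (fun d p => d.modify p.2 [] (fun l => l ++ [p.1])) (PySem.Dict.empty) =
      (xs.map Prod.swap).foldl
        (fun (d : PySem.Dict Int (List Int)) p => d.modify p.1 [] (fun l => l ++ [p.2]))
        (PySem.Dict.empty) := by
    rw [List.foldl_map]; rfl
  -- keys of the grouped dict = set of the values, in first-occurrence order
  have hkeys :
      ((xs.map Prod.swap).foldl
        (fun (d : PySem.Dict Int (List Int)) p => d.modify p.1 [] (fun l => l ++ [p.2]))
        (PySem.Dict.empty)).keys = PySem.Set.ofList (xs.map (fun p => p.2)) := by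
    rw [PySem.Dict.keys_foldl_modify_key (xs.map Prod.swap) (fun p => p.1)
        ([] : List Int) (fun _ p l => l ++ [p.2]) PySem.Dict.empty]
    simp [PySem.Set.update_nil_left, Function.comp_def]
  rw [hswap, hkeys, max?_ofList_id]
  cases hmax : PySem.List.max? (xs.map (fun p => p.2)) (fun x : Int => x) with
  | none =>
      rw [PySem.List.max?_eq_none_iff, List.map_eq_nil_iff] at hmax
      subst hmax
      rfl
  | some m =>
      -- bucket m of the grouped dict = keys whose value is m, in order
      dsimp only
      rw [PySem.Dict.getD_foldl_modify_append]
      simp only [PySem.Dict.getD_empty, List.nil_append, List.filter_map, List.map_map]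
      apply congrArg
      apply List.filter_congr
      intro p _
      simp [eq_comm]
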